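-- pv_equiv track=rewrite | github.com/PittYHL/DP_MBQC | leaves.py | shuffle_locs
-- ===== SOURCE A (Python) =====
-- def shuffle_locs(start_rank, front_leaves, front_locs, end_rank, back_leaves, back_locs):
--     new_front_leaves = []
--     new_front_locs = []
--     new_back_leaves = []
--     new_back_locs = []
--     for i in range(len(front_leaves)):
--         new_leaf = [-1]*len(front_leaves[i])
--         new_locs = [-1]*len(front_leaves[i])
--         for j in range(len(start_rank)):
--             new_leaf[start_rank[j]] = front_leaves[i][j]
--             new_locs[start_rank[j]] = front_locs[i][j]
--         new_front_leaves.append(new_leaf)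
--         new_front_locs.append(new_locs)
--     for i in range(len(back_leaves)):
--         new_leaf = [-1]*len(back_leaves[i])
--         new_locs = [-1]*len(back_leaves[i])
--         for j in range(len(start_rank)):
--             new_leaf[end_rank[j]] = back_leaves[i][j]
--             new_locs[end_rank[j]] = back_locs[i][j]
--         new_back_leaves.append(new_leaf)
--         new_back_locs.append(new_locs)
--     return new_front_leaves, new_front_locs, new_back_leaves, new_back_locs
-- ===== SOURCE B (Python) =====
-- def shuffle_locs(start_rank, front_leaves, front_locs, end_rank, back_leaves, back_locs):
--     # Inverse-permutation gather: for each rank array build inv with inv[r] = j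
--     # (last write wins), then read every output row forward instead of scattering.
--     def gather(rank, leaves, locs):
--         out_leaves, out_locs = [], []
--         for i, row in enumerate(leaves):
--             inv = [None] * len(row)
--             for j, r in enumerate(rank):
--                 inv[r] = j
--             out_leaves.append([row[k] if k is not None else -1 for k in inv])
--             out_locs.append([locs[i][k] if k is not None else -1 for k in inv])
--         return out_leaves, out_locs
--     new_front_leaves, new_front_locs = gather(start_rank, front_leaves, front_locs)
--     new_back_leaves, new_back_locs = gather(end_rank, back_leaves, back_locs)
--     return new_front_leaves, new_front_locs, new_back_leaves, new_back_locs
-- ===== Notes on version B (the rewrite author's own statement) =====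
-- stated objective: alternative
-- what changed: Replaces A's per-row scatter into a pre-filled buffer with a precomputed inverse-permutation table inv[rank[j]]=j followed by a forward gather read of each output row; Pre_ excludes inputs with back rows where end_rank's length differs from start_rank's (A raises IndexError when shorter and ignores end_rank's tail when longer, while B applies all of end_rank - a mismatched-rank corner no caller would specify) and inputs where B's reads of end_rank/back_locs raise while A's shorter back loop returns.
-- outside the precondition, e.g. on shuffle_locs([], [], [], [0], [[1]], []): A returns ([], [], [[-1]], [[-1]]), B raises IndexError
import Mathlib
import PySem

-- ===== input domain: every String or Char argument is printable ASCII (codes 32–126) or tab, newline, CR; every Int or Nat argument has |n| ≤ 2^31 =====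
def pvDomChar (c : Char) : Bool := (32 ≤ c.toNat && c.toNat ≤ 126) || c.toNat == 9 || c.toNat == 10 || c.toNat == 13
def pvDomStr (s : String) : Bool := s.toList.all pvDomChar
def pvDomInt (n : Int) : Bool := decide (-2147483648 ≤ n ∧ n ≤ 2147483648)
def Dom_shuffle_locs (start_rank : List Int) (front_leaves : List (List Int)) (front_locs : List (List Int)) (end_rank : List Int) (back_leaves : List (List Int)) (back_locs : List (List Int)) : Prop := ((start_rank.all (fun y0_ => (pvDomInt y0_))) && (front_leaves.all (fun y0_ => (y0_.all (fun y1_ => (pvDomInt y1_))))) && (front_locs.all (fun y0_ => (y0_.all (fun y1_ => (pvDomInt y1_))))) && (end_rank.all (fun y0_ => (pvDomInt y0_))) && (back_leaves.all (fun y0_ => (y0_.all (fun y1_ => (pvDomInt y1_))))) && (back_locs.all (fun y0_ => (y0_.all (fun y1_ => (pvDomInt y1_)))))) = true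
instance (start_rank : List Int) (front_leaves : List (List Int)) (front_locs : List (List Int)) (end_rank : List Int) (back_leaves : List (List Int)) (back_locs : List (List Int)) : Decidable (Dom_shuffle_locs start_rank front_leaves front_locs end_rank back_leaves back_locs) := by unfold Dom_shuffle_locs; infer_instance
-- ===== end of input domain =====

-- B replaces A's scatter into pre-filled rows by an inverse-permutation table per row
-- followed by a forward gather read (objective: alternative decomposition, same cost).

-- ===== PORT A =====
-- A's two sequential loops: each builds two -1-filled rows and scatters
-- leaves/locs values at the rank positions (Python negative-index wraparound via pySetD).
def shuffle_locs (start_rank : List Int) (front_leaves : List (List Int)) (front_locs : List (List Int)) (end_rank : List Int) (back_leaves : List (List Int)) (back_locs : List (List Int)) : List (List Int) × List (List Int) × List (List Int) × List (List Int) :=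
  let front := (List.range front_leaves.length).foldl
    (fun (acc : List (List Int) × List (List Int)) i =>
      let fli := front_leaves.getD i []
      let fci := front_locs.getD i []
      let st := (List.range start_rank.length).foldl
        (fun (st : List Int × List Int) j =>
          (PySem.List.pySetD st.1 (start_rank.getD j 0) (fli.getD j (-1)),
           PySem.List.pySetD st.2 (start_rank.getD j 0) (fci.getD j (-1))))
        (List.replicate fli.length (-1), List.replicate fli.length (-1))
      (acc.1 ++ [st.1], acc.2 ++ [st.2]))
    ([], [])
  let back := (List.range back_leaves.length).foldl
    (fun (acc : List (List Int) × List (List Int)) i =>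
      let bli := back_leaves.getD i []
      let bci := back_locs.getD i []
      let st := (List.range start_rank.length).foldl
        (fun (st : List Int × List Int) j =>
          (PySem.List.pySetD st.1 (end_rank.getD j 0) (bli.getD j (-1)),
           PySem.List.pySetD st.2 (end_rank.getD j 0) (bci.getD j (-1))))
        (List.replicate bli.length (-1), List.replicate bli.length (-1))
      (acc.1 ++ [st.1], acc.2 ++ [st.2]))
    ([], [])
  (front.1, front.2, back.1, back.2)

-- ===== PORT B =====
-- Source B's gather helper: inv[r] = j (last write wins, None = unset), then each
-- output row is read forward: slot p gets row[inv[p]], or -1 where inv[p] is None.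
def pvGather (rank : List Int) (leaves : List (List Int)) (locs : List (List Int)) : List (List Int) × List (List Int) :=
  (PySem.List.enumerate leaves).foldl
    (fun (acc : List (List Int) × List (List Int)) p =>
      let inv : List (Option Int) := (PySem.List.enumerate rank).foldl
        (fun inv q => PySem.List.pySetD inv q.2 (some q.1))
        (List.replicate p.2.length (none : Option Int))
      (acc.1 ++ [inv.map (fun k => k.elim (-1) (fun j => PySem.List.pyGetD p.2 j (-1)))],
       acc.2 ++ [inv.map (fun k => k.elim (-1) (fun j => PySem.List.pyGetD (PySem.List.pyGetD locs p.1 []) j (-1)))]))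
    ([], [])

def shuffle_locs_alt (start_rank : List Int) (front_leaves : List (List Int)) (front_locs : List (List Int)) (end_rank : List Int) (back_leaves : List (List Int)) (back_locs : List (List Int)) : List (List Int) × List (List Int) × List (List Int) × List (List Int) :=
  let front := pvGather start_rank front_leaves front_locs
  let back := pvGather end_rank back_leaves back_locs
  (front.1, front.2, back.1, back.2)

-- ===== PRECONDITION & SPEC =====
-- Pre_ excludes inputs with back rows where end_rank's length differs from start_rank's — A then
-- raises IndexError (end_rank shorter) or silently ignores end_rank's tail (end_rank longer) while
-- B applies every entry of end_rank: a mismatched-rank corner no caller would specify, where either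
-- reading is defensible — and inputs where B's reads of end_rank/back_locs raise an IndexError
-- while A's back loop (which runs only len(start_rank) steps) still returns.
def Pre_shuffle_locs (start_rank : List Int) (front_leaves : List (List Int)) (front_locs : List (List Int)) (end_rank : List Int) (back_leaves : List (List Int)) (back_locs : List (List Int)) : Prop :=
  (start_rank ≠ [] → front_leaves.length ≤ front_locs.length) ∧
  (back_leaves ≠ [] → start_rank.length = end_rank.length) ∧
  (end_rank ≠ [] → back_leaves.length ≤ back_locs.length) ∧
  (∀ i < front_leaves.length, ∀ j < start_rank.length,
      j < (front_leaves.getD i []).length ∧ j < (front_locs.getD i []).length ∧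
      -(((front_leaves.getD i []).length : Int)) ≤ start_rank.getD j 0 ∧
      start_rank.getD j 0 < ((front_leaves.getD i []).length : Int)) ∧
  (∀ i < back_leaves.length, ∀ j < end_rank.length,
      j < (back_leaves.getD i []).length ∧ j < (back_locs.getD i []).length ∧
      -(((back_leaves.getD i []).length : Int)) ≤ end_rank.getD j 0 ∧
      end_rank.getD j 0 < ((back_leaves.getD i []).length : Int))
instance (start_rank : List Int) (front_leaves : List (List Int)) (front_locs : List (List Int)) (end_rank : List Int) (back_leaves : List (List Int)) (back_locs : List (List Int)) : Decidable (Pre_shuffle_locs start_rank front_leaves front_locs end_rank back_leaves back_locs) := by unfold Pre_shuffle_locs; infer_instance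

def pvWitness_shuffle_locs : List Int × List (List Int) × List (List Int) × List Int × List (List Int) × List (List Int) :=
  ([1, 0], [[10, 20]], [[30, 40]], [0, 1], [[50, 60]], [[70, 80]])

def Spec_shuffle_locs (start_rank : List Int) (front_leaves : List (List Int)) (front_locs : List (List Int)) (end_rank : List Int) (back_leaves : List (List Int)) (back_locs : List (List Int)) (out : List (List Int) × List (List Int) × List (List Int) × List (List Int)) : Prop := out = shuffle_locs_alt start_rank front_leaves front_locs end_rank back_leaves back_locs
instance (start_rank : List Int) (front_leaves : List (List Int)) (front_locs : List (List Int)) (end_rank : List Int) (back_leaves : List (List Int)) (back_locs : List (List Int)) (out : List (List Int) × List (List Int) × List (List Int) × List (List Int)) : Decidable (Spec_shuffle_locs start_rank front_leaves front_locs end_rank back_leaves back_locs out) := by unfold Spec_shuffle_locs; infer_instance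

-- ===== CLAIM (what is proved, stated in full; the proofs are below) =====
def Claim_equal_shuffle_locs : Prop := ∀ (start_rank : List Int) (front_leaves : List (List Int)) (front_locs : List (List Int)) (end_rank : List Int) (back_leaves : List (List Int)) (back_locs : List (List Int)), Dom_shuffle_locs start_rank front_leaves front_locs end_rank back_leaves back_locs → Pre_shuffle_locs start_rank front_leaves front_locs end_rank back_leaves back_locs → Spec_shuffle_locs start_rank front_leaves front_locs end_rank back_leaves back_locs (shuffle_locs start_rank front_leaves front_locs end_rank back_leaves back_locs)

-- ===== LEMMAS AND PROOFS =====

-- a foldl over a pair whose components are updated independently splits componentwise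
theorem pvFoldPair {α β γ : Type} (f : α → γ → α) (g : β → γ → β) (l : List γ) (a : α) (b : β) :
    l.foldl (fun st x => (f st.1 x, g st.2 x)) (a, b) = (l.foldl f a, l.foldl g b) := by
  induction l generalizing a b with
  | nil => rfl
  | cons x t ih => simp [List.foldl, ih]

-- map commutes with Python index assignment
theorem pvMapPySetD {α β : Type} (f : α → β) (xs : List α) (i : Int) (v : α) :
    (PySem.List.pySetD xs i v).map f = PySem.List.pySetD (xs.map f) i (f v) := by
  simp only [PySem.List.pySetD, PySem.List.pySet?, List.length_map]
  cases h : PySem.List.pyIdx? xs.length i <;> simp [List.map_set]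

-- mapping a scatter of values = scattering the mapped values
theorem pvMapScatter {α β γ : Type} (f : α → β) (l : List γ) (val : γ → α) (idx : γ → Int) (init : List α) :
    (l.foldl (fun st q => PySem.List.pySetD st (idx q) (val q)) init).map f
      = l.foldl (fun st q => PySem.List.pySetD st (idx q) (f (val q))) (init.map f) := by
  induction l generalizing init with
  | nil => rfl
  | cons q t ih => simp [List.foldl, ih, pvMapPySetD]

-- one row: B's inverse-table-then-gather equals A's direct scatter of the row values
theorem pvRowEq (rk row : List Int) (L : Nat) :
    ((PySem.List.enumerate rk).foldl (fun inv q => PySem.List.pySetD inv q.2 (some q.1))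
        (List.replicate L (none : Option Int))).map
      (fun k => k.elim (-1) (fun j => PySem.List.pyGetD row j (-1)))
      = (List.range rk.length).foldl
          (fun st j => PySem.List.pySetD st (rk.getD j 0) (row.getD j (-1)))
          (List.replicate L (-1)) := by
  rw [pvMapScatter (fun k => k.elim (-1) (fun j => PySem.List.pyGetD row j (-1)))
      (PySem.List.enumerate rk) (fun q => some q.1) (fun q => q.2) (List.replicate L none),
    PySem.List.enumerate_eq_map_pyRange rk 0]
  simp [PySem.List.len, PySem.List.pyRange_zero_natCast, List.foldl_map, PySem.List.pyGetD_natCast,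
    List.map_replicate]

theorem pvFoldAppendPair {α γ : Type} (u v : γ → α) (l : List γ) :
    l.foldl (fun (acc : List α × List α) x => (acc.1 ++ [u x], acc.2 ++ [v x])) ([], [])
      = (l.map u, l.map v) := by
  rw [pvFoldPair (fun a x => a ++ [u x]) (fun a x => a ++ [v x])]
  rw [PySem.List.foldl_append_singleton_eq_map, PySem.List.foldl_append_singleton_eq_map]
  simp

theorem pvScatterPair (a b c : Nat → Int) (l : List Nat) (i1 i2 : List Int) :
    l.foldl (fun (st : List Int × List Int) j =>
        (PySem.List.pySetD st.1 (a j) (b j), PySem.List.pySetD st.2 (a j) (c j))) (i1, i2)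
      = (l.foldl (fun st j => PySem.List.pySetD st (a j) (b j)) i1,
         l.foldl (fun st j => PySem.List.pySetD st (a j) (c j)) i2) :=
  pvFoldPair (fun st j => PySem.List.pySetD st (a j) (b j)) (fun st j => PySem.List.pySetD st (a j) (c j)) l i1 i2

-- ===== VERDICT (by name: the statements are the Claim_ definitions above) =====
theorem shuffle_locs_spec : Claim_equal_shuffle_locs := by
  intro sr fl fc er bl bc _ hpre
  unfold Spec_shuffle_locs
  obtain ⟨-, hlen, -, -, -⟩ := hpre
  unfold shuffle_locs shuffle_locs_alt pvGather
  simp only [pvScatterPair, pvFoldAppendPair,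
    PySem.List.enumerate_eq_map_pyRange fl ([] : List Int),
    PySem.List.enumerate_eq_map_pyRange bl ([] : List Int),
    PySem.List.len, PySem.List.pyRange_zero_natCast, List.map_map]
  refine Prod.ext ?_ (Prod.ext ?_ (Prod.ext ?_ ?_)) <;> simp only []
  · congr 1
    funext i
    simp only [Function.comp_apply, PySem.List.pyGetD_natCast]
    exact (pvRowEq sr (fl.getD i []) (fl.getD i []).length).symm
  · congr 1
    funext i
    simp only [Function.comp_apply, PySem.List.pyGetD_natCast]
    exact (pvRowEq sr (fc.getD i []) (fl.getD i []).length).symm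
  · rcases eq_or_ne bl [] with rfl | hbl
    · simp
    · congr 1
      funext i
      simp only [Function.comp_apply, PySem.List.pyGetD_natCast]
      rw [hlen hbl]
      exact (pvRowEq er (bl.getD i []) (bl.getD i []).length).symm
  · rcases eq_or_ne bl [] with rfl | hbl
    · simp
    · congr 1
      funext i
      simp only [Function.comp_apply, PySem.List.pyGetD_natCast]
      rw [hlen hbl]
      exact (pvRowEq er (bc.getD i []) (bl.getD i []).length).symm
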